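-- pv_equiv track=rewrite | github.com/code-dot-org/code-dot-org | flask/rubric/src/codeorg_utils/utils.py | toCodeList
-- ===== SOURCE A (Python) =====
-- def toCodeList(code):
--     """
--     It is not easy to dropout lines or blocks when
--     the code is in raw strings. Let us instead encode
--     them as a list of tokens with depths.
--     """
--     tokens = code.split()
--     depth = 0
--     codeTokens = []
--
--     for tok in tokens:
--         if tok == '[':
--             # -1 = meaningless depth
--             codeTokens.append((tok, -1))
--             depth += 1
--         elif tok == ']':
--             codeTokens.append((tok, -1))
--             depth -= 1
--         else:
--             codeTokens.append((tok, depth))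
--
--     return codeTokens
-- ===== SOURCE B (Python) =====
-- def _depths(tokens, d):
--     # exclusive prefix sum of bracket deltas: the depth seen by each token
--     out = []
--     for t in tokens:
--         out.append(d)
--         d += (t == '[') - (t == ']')
--     return out
--
--
-- def toCodeList(code):
--     tokens = code.split()
--     return [(t, -1 if t in ('[', ']') else d)
--             for t, d in zip(tokens, _depths(tokens, 0))]
-- ===== Notes on version B (the rewrite author's own statement) =====
-- stated objective: alternative
-- what changed: Replaces A's single stateful loop (mutable depth + append) by a precompute-then-map decomposition: a recursive exclusive prefix sum of bracket deltas yields per-token depths, then a zip/comprehension labels tokens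
import Mathlib
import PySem

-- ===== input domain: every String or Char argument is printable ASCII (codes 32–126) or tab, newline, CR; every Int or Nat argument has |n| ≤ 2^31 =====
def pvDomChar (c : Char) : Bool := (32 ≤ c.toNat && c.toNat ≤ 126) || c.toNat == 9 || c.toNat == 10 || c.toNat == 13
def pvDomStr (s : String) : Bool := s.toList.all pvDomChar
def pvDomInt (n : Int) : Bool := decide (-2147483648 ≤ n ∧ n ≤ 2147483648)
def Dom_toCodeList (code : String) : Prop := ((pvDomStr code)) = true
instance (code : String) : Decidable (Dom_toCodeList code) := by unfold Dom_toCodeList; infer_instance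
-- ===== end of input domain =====

-- B replaces A's single stateful loop by exclusive-prefix-sum of bracket deltas, then zip+map (alternative decomposition).

-- ===== PORT A =====
-- single left-to-right fold carrying (depth, accumulated output), as A's loop does
def toCodeList (code : String) : List (String × Int) :=
  let tokens := PySem.Str.split₀ code
  (tokens.foldl (fun (st : Int × List (String × Int)) tok =>
      if tok = "[" then (st.1 + 1, st.2 ++ [(tok, -1)])
      else if tok = "]" then (st.1 - 1, st.2 ++ [(tok, -1)])
      else (st.1, st.2 ++ [(tok, st.1)])) (0, [])).2

-- ===== PORT B =====
-- exclusive prefix sum of bracket deltas (B's _depths): loop appending the running depth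
def pvDepthsB (tokens : List String) (d : Int) : List Int :=
  (tokens.foldl (fun (st : Int × List Int) t =>
      (st.1 + (if t = "[" then 1 else 0) - (if t = "]" then 1 else 0), st.2 ++ [st.1]))
    (d, [])).2

def toCodeList_alt (code : String) : List (String × Int) :=
  let tokens := PySem.Str.split₀ code
  (tokens.zip (pvDepthsB tokens 0)).map
    (fun td => (td.1, if td.1 = "[" ∨ td.1 = "]" then (-1 : Int) else td.2))

-- ===== PRECONDITION & SPEC =====
def Spec_toCodeList (code : String) (out : List (String × Int)) : Prop := out = toCodeList_alt code
instance (code : String) (out : List (String × Int)) : Decidable (Spec_toCodeList code out) := by unfold Spec_toCodeList; infer_instance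

-- ===== CLAIM (what is proved, stated in full; the proofs are below) =====
def Claim_equal_toCodeList : Prop := ∀ (code : String), Dom_toCodeList code → Spec_toCodeList code (toCodeList code)

-- ===== LEMMAS AND PROOFS =====
-- functional characterization of B's depth loop
def pvScan : List String → Int → List Int
  | [], _ => []
  | t :: ts, d =>
    d :: pvScan ts (d + (if t = "[" then 1 else 0) - (if t = "]" then 1 else 0))

lemma pvDepthsB_eq_scan (ts : List String) : ∀ (d : Int) (acc : List Int),
    (ts.foldl (fun (st : Int × List Int) t =>
      (st.1 + (if t = "[" then 1 else 0) - (if t = "]" then 1 else 0), st.2 ++ [st.1]))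
      (d, acc)).2 = acc ++ pvScan ts d := by
  induction ts with
  | nil => intro d acc; simp [pvScan]
  | cons t ts ih => intro d acc; simp [pvScan, List.foldl, ih]

lemma pv_fold_eq (ts : List String) : ∀ (d : Int) (acc : List (String × Int)),
    (ts.foldl (fun (st : Int × List (String × Int)) tok =>
      if tok = "[" then (st.1 + 1, st.2 ++ [(tok, -1)])
      else if tok = "]" then (st.1 - 1, st.2 ++ [(tok, -1)])
      else (st.1, st.2 ++ [(tok, st.1)])) (d, acc)).2
    = acc ++ (ts.zip (pvScan ts d)).map
        (fun td => (td.1, if td.1 = "[" ∨ td.1 = "]" then (-1 : Int) else td.2)) := by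
  induction ts with
  | nil => intro d acc; simp [pvScan]
  | cons t ts ih =>
    intro d acc
    by_cases h1 : t = "["
    · simp [pvScan, h1, List.foldl, ih]
    · by_cases h2 : t = "]"
      · simp [pvScan, h2, List.foldl, ih]
      · simp [pvScan, h1, h2, List.foldl, ih]

-- ===== VERDICT (by name: the statement is the Claim_ definition above) =====
theorem toCodeList_spec : Claim_equal_toCodeList := by
  intro code _
  unfold Spec_toCodeList toCodeList toCodeList_alt
  simp only [pvDepthsB, pvDepthsB_eq_scan, List.nil_append]
  exact pv_fold_eq _ 0 []
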